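-- pv_equiv track=rewrite | github.com/paiv/aoc2016 | code/11-2-elevator/solve.py | make_state
-- ===== SOURCE A (Python) =====
-- def make_state(el, board):
--     # return (el, *(x for row in board for x in row))
--
--     def st(row):
--         pairs = sum(row[i] and row[i+1] for i in range(0, len(row), 2))
--         loneg = sum(row[i] and not row[i+1] for i in range(0, len(row), 2))
--         lonem = sum(not row[i] and row[i+1] for i in range(0, len(row), 2))
--         return '{}p{}g{}m'.format(pairs, loneg, lonem)
--
--     state = '|'.join(st(row) for row in board)
--     return '{}:{}'.format(el, state)
-- ===== SOURCE B (Python) =====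
-- def make_state(el, board):
--     def st(row):
--         gens, mics = row[0::2], row[1::2]
--         cols = list(zip(gens, mics, strict=True))
--         lonem = sum(m for g, m in cols if not g)
--         loneg = sum(1 for g, m in cols if g and not m)
--         pairs = sum(mics) - lonem
--         return '{}p{}g{}m'.format(pairs, loneg, lonem)
--     return '{}:{}'.format(el, '|'.join(st(row) for row in board))
-- ===== Notes on version B (the rewrite author's own statement) =====
-- stated objective: alternative
-- what changed: A makes three stepped-index sum comprehensions per row over range(0,len(row),2) using Python's value-returning and/not; B transposes each row into generator/microchip columns with extended slices row[0::2]/row[1::2], computes lonem and loneg from the strictly zipped columns, and derives pairs algebraically as sum(mics)-lonem instead of scanning for it; Pre_ excludes boards with an odd-length row, where A raises IndexError (row[i+1]) and B raises ValueError (strict zip).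
import Mathlib
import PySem

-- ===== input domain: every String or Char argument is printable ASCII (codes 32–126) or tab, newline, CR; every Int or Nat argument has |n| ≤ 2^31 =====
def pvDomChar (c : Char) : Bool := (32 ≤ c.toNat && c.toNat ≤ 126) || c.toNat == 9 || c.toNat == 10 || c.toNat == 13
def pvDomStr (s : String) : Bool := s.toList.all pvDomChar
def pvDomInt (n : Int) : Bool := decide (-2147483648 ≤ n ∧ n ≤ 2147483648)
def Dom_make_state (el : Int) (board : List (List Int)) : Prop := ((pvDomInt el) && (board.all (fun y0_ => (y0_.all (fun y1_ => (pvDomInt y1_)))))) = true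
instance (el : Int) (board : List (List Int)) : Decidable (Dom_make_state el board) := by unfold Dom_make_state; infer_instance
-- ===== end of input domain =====

-- B transposes each row into its two columns with extended slices and derives the pairs
-- counter algebraically (sum of the microchip column minus lonem) instead of A's three
-- stepped-index sum comprehensions (objective: alternative decomposition, same cost).

-- ===== PORT A =====
-- st(row): three sums over range(0, len(row), 2); Python's value-returning `and`/`not`
-- on ints is transliterated as `if g = 0 then … else …` (0 is the only falsy int);
-- indexing is total pyGetD, exact under Pre_ (even-length rows keep i+1 in range).
def pvStA (row : List Int) : String :=
  let idxs := PySem.List.pyRange 0 (PySem.List.len row) 2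
  let pairs := idxs.foldl (fun s i => s +
    (if PySem.List.pyGetD row i 0 = 0 then PySem.List.pyGetD row i 0
     else PySem.List.pyGetD row (i+1) 0)) 0
  let loneg := idxs.foldl (fun s i => s +
    (if PySem.List.pyGetD row i 0 = 0 then PySem.List.pyGetD row i 0
     else if PySem.List.pyGetD row (i+1) 0 = 0 then 1 else 0)) 0
  let lonem := idxs.foldl (fun s i => s +
    (if PySem.List.pyGetD row i 0 = 0 then PySem.List.pyGetD row (i+1) 0
     else 0)) 0
  PySem.Int.toStr pairs ++ "p" ++ PySem.Int.toStr loneg ++ "g" ++ PySem.Int.toStr lonem ++ "m"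

def make_state (el : Int) (board : List (List Int)) : String :=
  PySem.Int.toStr el ++ ":" ++ PySem.Str.join "|" (board.map pvStA)

-- ===== PORT B =====
-- st(row): gens = row[0::2], mics = row[1::2] (slice? is some for the literal step 2, so
-- .getD [] is never the fallback); cols = zip(gens, mics, strict=True) is List.zip, exact under
-- Pre_ (even-length rows give equal column lengths, so strict zip does not raise);
-- lonem/loneg read the zipped columns, pairs = sum(mics) - lonem.
def pvStB (row : List Int) : String :=
  let gens := (PySem.List.slice? row (some 0) none 2).getD []
  let mics := (PySem.List.slice? row (some 1) none 2).getD []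
  let cols := gens.zip mics
  let lonem := ((cols.filter (fun p => p.1 == 0)).map (fun p => p.2)).sum
  let loneg : Int := ((cols.filter (fun p => !(p.1 == 0) && p.2 == 0)).length : Int)
  let pairs := mics.sum - lonem
  PySem.Int.toStr pairs ++ "p" ++ PySem.Int.toStr loneg ++ "g" ++ PySem.Int.toStr lonem ++ "m"

def make_state_alt (el : Int) (board : List (List Int)) : String :=
  PySem.Int.toStr el ++ ":" ++ PySem.Str.join "|" (board.map pvStB)

-- ===== PRECONDITION & SPEC =====
-- Pre_ excludes boards containing an odd-length row: on those the Python A raises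
-- IndexError (row[i+1] past the end) and B raises ValueError (strict zip, unequal columns).
def Pre_make_state (el : Int) (board : List (List Int)) : Prop :=
  ∀ row ∈ board, row.length % 2 = 0
instance (el : Int) (board : List (List Int)) : Decidable (Pre_make_state el board) := by
  unfold Pre_make_state; infer_instance

def pvWitness_make_state : Int × List (List Int) := (2, [[1, 1, 0, 2], [0, 0]])

def Spec_make_state (el : Int) (board : List (List Int)) (out : String) : Prop := out = make_state_alt el board
instance (el : Int) (board : List (List Int)) (out : String) : Decidable (Spec_make_state el board out) := by unfold Spec_make_state; infer_instance

-- ===== CLAIM (what is proved, stated in full; the proofs are below) =====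
def Claim_equal_make_state : Prop := ∀ (el : Int) (board : List (List Int)), Dom_make_state el board → Pre_make_state el board → Spec_make_state el board (make_state el board)

-- ===== LEMMAS AND PROOFS =====

-- a filterMap whose function always hits `some` is a map
theorem pv_filterMap_eq_map {α β : Type} (f : α → Option β) (g : α → β) :
    ∀ (l : List α), (∀ x ∈ l, f x = some (g x)) → l.filterMap f = l.map g
  | [], _ => rfl
  | x :: l, h => by
      rw [List.filterMap_cons, h x (by simp), List.map_cons,
        pv_filterMap_eq_map f g l (fun y hy => h y (by simp [hy]))]

-- row[0::2] is the map k ↦ row[2k] over range ⌈n/2⌉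
theorem pv_slice0 (xs : List Int) :
    (PySem.List.slice? xs (some 0) none 2).getD []
      = (List.range ((xs.length + 1) / 2)).map (fun k => xs.getD (2 * k) 0) := by
  unfold PySem.List.slice? PySem.List.sliceIndices
  norm_num
  have hc : (if 0 < xs.length then (((xs.length : Int) + 2 - 1) / 2).toNat else 0)
      = (xs.length + 1) / 2 := by
    split <;> omega
  rw [hc]
  refine pv_filterMap_eq_map _ _ _ (fun k hk => ?_)
  have hk' : k < (xs.length + 1) / 2 := List.mem_range.mp hk
  have h2 : 2 * k < xs.length := by omega
  have ht : (2 * (k : Int)).toNat = 2 * k := by omega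
  rw [ht, List.getElem?_eq_getElem h2]
  simp

-- row[1::2] is the map k ↦ row[2k+1] over range ⌊n/2⌋
theorem pv_slice1 (xs : List Int) :
    (PySem.List.slice? xs (some 1) none 2).getD []
      = (List.range (xs.length / 2)).map (fun k => xs.getD (2 * k + 1) 0) := by
  unfold PySem.List.slice? PySem.List.sliceIndices
  norm_num
  rcases xs with _ | ⟨a, l⟩
  · simp
  · have hmin : min 1 ((a :: l).length : Int) = 1 := by
      simp [List.length_cons]
    rw [hmin]
    have hc : (if 1 < (a :: l).length then ((((a :: l).length : Int) - 1 + 2 - 1) / 2).toNat else 0)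
        = (a :: l).length / 2 := by
      split <;> omega
    rw [hc]
    refine pv_filterMap_eq_map _ _ _ (fun k hk => ?_)
    have hk' : k < (a :: l).length / 2 := List.mem_range.mp hk
    have h2 : 2 * k + 1 < (a :: l).length := by omega
    have ht : ((1 : Int) + 2 * (k : Int)).toNat = 2 * k + 1 := by omega
    rw [ht, List.getElem?_eq_getElem h2]
    simp

-- A's stepped-index fold, for an even-length row, is a sum over the zipped columns
theorem pv_foldA (row : List Int) (h : row.length % 2 = 0) (f : Int → Int → Int) :
    (PySem.List.pyRange 0 (PySem.List.len row) 2).foldl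
        (fun s i => s + f (PySem.List.pyGetD row i 0) (PySem.List.pyGetD row (i+1) 0)) 0
      = ((List.range (row.length / 2)).map
          (fun k => f (row.getD (2 * k) 0) (row.getD (2 * k + 1) 0))).sum := by
  rw [PySem.List.pyRange_of_pos 0 (PySem.List.len row) (by norm_num)]
  rw [List.foldl_map, PySem.List.foldl_add]
  have hc : (if (0:Int) < PySem.List.len row then (((PySem.List.len row) - 0 + 2 - 1) / 2).toNat else 0)
      = row.length / 2 := by
    simp [PySem.List.len]
    split <;> omega
  rw [hc, zero_add]
  refine congrArg List.sum (List.map_congr_left fun k hk => ?_)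
  have hk' : k < row.length / 2 := List.mem_range.mp hk
  rw [PySem.List.pyGetD_of_nonneg row 0 (by omega), PySem.List.pyGetD_of_nonneg row 0 (by omega)]
  have t1 : ((0:Int) + 2 * (k : Int)).toNat = 2 * k := by omega
  have t2 : ((0:Int) + 2 * (k : Int) + 1).toNat = 2 * k + 1 := by omega
  rw [t1, t2]

-- generic sum identities over a list of pairs
theorem pv_sum_split : ∀ (z : List (Int × Int)),
    (z.map (fun p => if p.1 = 0 then p.1 else p.2)).sum
      = (z.map (fun p : Int × Int => p.2)).sum
        - ((z.filter (fun p => p.1 == 0)).map (fun p => p.2)).sum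
  | [] => rfl
  | p :: z => by
      by_cases h : p.1 = 0 <;>
        simp [pv_sum_split z, h] <;> ring

theorem pv_sum_count : ∀ (z : List (Int × Int)),
    (z.map (fun p => if p.1 = 0 then p.1 else if p.2 = 0 then 1 else 0)).sum
      = ((z.filter (fun p => !(p.1 == 0) && p.2 == 0)).length : Int)
  | [] => rfl
  | p :: z => by
      by_cases h1 : p.1 = 0
      · simp [pv_sum_count z, h1]
      · by_cases h2 : p.2 = 0 <;> simp [pv_sum_count z, h1, h2] <;> omega

theorem pv_sum_lonem : ∀ (z : List (Int × Int)),
    (z.map (fun p => if p.1 = 0 then p.2 else 0)).sum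
      = ((z.filter (fun p => p.1 == 0)).map (fun p => p.2)).sum
  | [] => rfl
  | p :: z => by
      by_cases h : p.1 = 0 <;> simp [pv_sum_lonem z, h]

theorem pv_row_eq (row : List Int) (h : row.length % 2 = 0) : pvStA row = pvStB row := by
  simp only [pvStA, pvStB]
  rw [pv_foldA row h (fun g m => if g = 0 then g else m),
      pv_foldA row h (fun g m => if g = 0 then g else if m = 0 then 1 else 0),
      pv_foldA row h (fun g m => if g = 0 then m else 0),
      pv_slice0, pv_slice1]
  have hodd : (row.length + 1) / 2 = row.length / 2 := by omega
  rw [hodd, List.zip_map']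
  have hmics : List.map (fun k => row.getD (2 * k + 1) 0) (List.range (row.length / 2))
      = List.map (fun p : Int × Int => p.2)
          (List.map (fun a => (row.getD (2 * a) 0, row.getD (2 * a + 1) 0))
            (List.range (row.length / 2))) := by
    simp [List.map_map]
  rw [hmics, ← pv_sum_split, ← pv_sum_count, ← pv_sum_lonem]
  simp [List.map_map, Function.comp_def]

-- ===== VERDICT (by name: the statement is the Claim_ definition above) =====
theorem make_state_spec : Claim_equal_make_state := by
  intro el board _ hpre
  unfold Spec_make_state make_state make_state_alt
  congr 1
  exact congrArg _ (List.map_congr_left fun row hr => pv_row_eq row (hpre row hr))
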